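-- pv_equiv track=rewrite | github.com/GundalaNikhil/DSA | scripts/add_mains_from_templates.py | split_cpp
-- ===== SOURCE A (Python) =====
-- def split_cpp(code):
--     includes = []
--     using_lines = []
--     body = []
--     for line in code.splitlines():
--         stripped = line.strip()
--         if stripped.startswith("#include"):
--             includes.append(stripped)
--         elif stripped == "using namespace std;":
--             using_lines.append(stripped)
--         else:
--             body.append(line)
--     return includes, using_lines, "\n".join(body).strip()
-- ===== SOURCE B (Python) =====
-- def split_cpp(code):
--     lines = code.splitlines()
--     includes = [l.strip() for l in lines if l.strip().startswith("#include")]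
--     using_lines = [l.strip() for l in lines if l.strip() == "using namespace std;"]
--     body = [l for l in lines
--             if not l.strip().startswith("#include") and l.strip() != "using namespace std;"]
--     return includes, using_lines, "\n".join(body).strip()
-- ===== Notes on version B (the rewrite author's own statement) =====
-- stated objective: simpler
-- what changed: Replaces the single three-way partitioning loop with three independent filter comprehensions over the split lines, one per returned bucket.
import Mathlib
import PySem

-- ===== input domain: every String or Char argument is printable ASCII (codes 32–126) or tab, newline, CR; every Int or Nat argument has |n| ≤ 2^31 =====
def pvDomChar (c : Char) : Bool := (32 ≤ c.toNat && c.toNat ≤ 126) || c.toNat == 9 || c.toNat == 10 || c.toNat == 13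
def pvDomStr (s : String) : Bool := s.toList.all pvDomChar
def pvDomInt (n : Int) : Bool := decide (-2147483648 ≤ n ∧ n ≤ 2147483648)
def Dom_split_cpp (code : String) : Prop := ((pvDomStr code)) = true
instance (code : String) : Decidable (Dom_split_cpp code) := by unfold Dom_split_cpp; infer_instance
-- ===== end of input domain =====

-- B replaces A's single three-way partitioning loop with three independent filter passes (simpler decomposition; same cost).

-- ===== PORT A =====
-- one pass, three accumulators, appended in branch order
def split_cpp (code : String) : List String × List String × String :=
  let st := (PySem.Str.splitlines code).foldl
    (fun (acc : List String × List String × List String) line =>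
      let stripped := PySem.Str.strip line
      if PySem.Str.startswith stripped "#include" then
        (acc.1 ++ [stripped], acc.2.1, acc.2.2)
      else if stripped == "using namespace std;" then
        (acc.1, acc.2.1 ++ [stripped], acc.2.2)
      else
        (acc.1, acc.2.1, acc.2.2 ++ [line]))
    ([], [], [])
  (st.1, st.2.1, PySem.Str.strip (PySem.Str.join "\n" st.2.2))

-- ===== PORT B =====
-- three filter comprehensions, one per bucket
def split_cpp_alt (code : String) : List String × List String × String :=
  let lines := PySem.Str.splitlines code
  let includes := (lines.filter (fun l => PySem.Str.startswith (PySem.Str.strip l) "#include")).map PySem.Str.strip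
  let usingLines := (lines.filter (fun l => PySem.Str.strip l == "using namespace std;")).map PySem.Str.strip
  let body := lines.filter (fun l =>
    !(PySem.Str.startswith (PySem.Str.strip l) "#include") && !(PySem.Str.strip l == "using namespace std;"))
  (includes, usingLines, PySem.Str.strip (PySem.Str.join "\n" body))

-- ===== PRECONDITION & SPEC =====
def Spec_split_cpp (code : String) (out : List String × List String × String) : Prop := out = split_cpp_alt code
instance (code : String) (out : List String × List String × String) : Decidable (Spec_split_cpp code out) := by unfold Spec_split_cpp; infer_instance

-- ===== CLAIM (what is proved, stated in full; the proofs are below) =====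
def Claim_equal_split_cpp : Prop := ∀ (code : String), Dom_split_cpp code → Spec_split_cpp code (split_cpp code)

-- ===== LEMMAS AND PROOFS =====

-- the literal "using namespace std;" does not start with "#include"
lemma lit_not_include :
    PySem.Chars.startswith ['u','s','i','n','g',' ','n','a','m','e','s','p','a','c','e',' ','s','t','d',';']
      ['#','i','n','c','l','u','d','e'] = false := by decide

-- A's loop, started at any accumulator, appends exactly B's three filtered lists
lemma loop_eq (lines : List String) (i u b : List String) :
    lines.foldl
      (fun (acc : List String × List String × List String) line =>
        let stripped := PySem.Str.strip line
        if PySem.Str.startswith stripped "#include" then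
          (acc.1 ++ [stripped], acc.2.1, acc.2.2)
        else if stripped == "using namespace std;" then
          (acc.1, acc.2.1 ++ [stripped], acc.2.2)
        else
          (acc.1, acc.2.1, acc.2.2 ++ [line]))
      (i, u, b)
    = (i ++ (lines.filter (fun l => PySem.Str.startswith (PySem.Str.strip l) "#include")).map PySem.Str.strip,
       u ++ (lines.filter (fun l => PySem.Str.strip l == "using namespace std;")).map PySem.Str.strip,
       b ++ lines.filter (fun l =>
         !(PySem.Str.startswith (PySem.Str.strip l) "#include") && !(PySem.Str.strip l == "using namespace std;"))) := by
  induction lines generalizing i u b with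
  | nil => simp
  | cons hd tl ih =>
    simp only [List.foldl_cons, List.filter_cons]
    simp at ih
    by_cases hp : PySem.Str.startswith (PySem.Str.strip hd) "#include" = true
    · have hq : ¬ PySem.Str.strip hd = "using namespace std;" := by
        intro h
        rw [h] at hp
        exact absurd hp (by decide)
      have hp2 := hp; simp at hp2
      simp [hp2, hq, ih, List.append_assoc]
    · have hp2 : PySem.Str.startswith (PySem.Str.strip hd) "#include" = false := by
        simpa using hp
      have hp3 := hp2; simp at hp3
      by_cases hq : PySem.Str.strip hd = "using namespace std;"
      · simp [hp3, hq, ih, lit_not_include, List.append_assoc]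
      · simp [hp3, hq, ih, List.append_assoc]

-- ===== VERDICT (by name: the statement is the Claim_ definition above) =====
theorem split_cpp_spec : Claim_equal_split_cpp := by
  intro code _
  show split_cpp code = split_cpp_alt code
  simp only [split_cpp, split_cpp_alt, loop_eq, List.nil_append]
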